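-- pv_equiv track=rewrite | github.com/wearespindle/python-wherescape | wherescape/connectors/gsheet/load_data.py | add_empty_columns
-- ===== SOURCE A (Python) =====
-- from itertools import zip_longest
--
-- def add_empty_columns(content: list, header: list, indexes: list, full_header: list) -> tuple:
--     """
--     adds columns where columns are missing to both the header and the content.
--
--     Params:
--     - content (list): full content to add empty columns to.
--     - header (list): header to add missing headers to.
--     - indexes (list): indexes of missing columns.
--     - full_header (list): expected containing correct header names.
--
--     Returns:
--     - content (list): content including new columns for missing fields.
--     - header (list): header including new column names for missing fields.
--     """
--     transposed = [list(i) for i in zip_longest(*content, fillvalue=None)]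
--     for i in indexes:
--         if full_header[i] in ["dss_record_source", "dss_load_date"]:
--             continue
--         transposed = transposed[:i] + [[None for _ in range(len(content))]] + transposed[i:]
--         header = header[:i] + [full_header[i]] + header[i:]
--     content = [list(i) for i in zip_longest(*transposed, fillvalue=None)]
--
--     return content, header
-- ===== SOURCE B (Python) =====
-- def add_empty_columns(content: list, header: list, indexes: list, full_header: list) -> tuple:
--     """Row-wise: pad each row to the max row length, then insert the missing
--     cells/headers directly, instead of transposing twice."""
--     width = max((len(r) for r in content), default=0)
--     rows = [r + [None] * (width - len(r)) for r in content]
--     header = list(header)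
--     for i in indexes:
--         name = full_header[i]
--         if name in ("dss_record_source", "dss_load_date"):
--             continue
--         for r in rows:
--             r.insert(i, None)
--         header.insert(i, name)
--     return rows, header
-- ===== Notes on version B (the rewrite author's own statement) =====
-- stated objective: simpler
-- what changed: B replaces A's transpose-splice-retranspose (two zip_longest passes plus column-slice splicing) by direct row-wise work: pad each row to the maximum row length, then insert the missing cell/header at each index with list.insert.
-- intended difference: On nonempty content whose rows are all empty and whose indexes all name the skipped dss_ columns, A's transpose collapses the table and returns [] for the content, silently dropping all rows; B returns one empty row per input row, preserving the row count as intended. — e.g. on add_empty_columns([[]], ["h"], [], ["h"]): A returns ([], ["h"]), B returns ([[]], ["h"])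
import Mathlib
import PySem

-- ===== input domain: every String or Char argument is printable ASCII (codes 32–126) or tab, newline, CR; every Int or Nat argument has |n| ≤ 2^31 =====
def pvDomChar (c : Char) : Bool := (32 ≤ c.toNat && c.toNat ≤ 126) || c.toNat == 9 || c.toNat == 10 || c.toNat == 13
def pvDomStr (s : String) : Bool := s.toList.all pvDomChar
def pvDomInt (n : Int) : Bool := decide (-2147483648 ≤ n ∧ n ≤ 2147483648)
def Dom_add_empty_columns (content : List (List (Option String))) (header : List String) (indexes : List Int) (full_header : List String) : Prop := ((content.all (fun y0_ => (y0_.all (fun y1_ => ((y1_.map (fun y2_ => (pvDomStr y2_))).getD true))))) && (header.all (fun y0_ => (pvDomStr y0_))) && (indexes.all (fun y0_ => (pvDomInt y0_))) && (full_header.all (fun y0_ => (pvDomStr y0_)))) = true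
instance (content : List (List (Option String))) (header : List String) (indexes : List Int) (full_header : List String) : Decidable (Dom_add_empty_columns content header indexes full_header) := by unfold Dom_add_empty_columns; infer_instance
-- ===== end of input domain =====

-- B drops the double transpose: it pads each row to the maximum row length and inserts
-- the missing cells/headers row-wise (objective: simpler; same asymptotic cost).

-- ===== PORT A =====
-- [list(i) for i in itertools.zip_longest(*rows, fillvalue=None)]: max-row-length many
-- output rows; entry j of input row r, or None where r is too short (exact semantics).
def pvZipLongest (rows : List (List (Option String))) : List (List (Option String)) :=
  let m := rows.foldl (fun acc r => max acc r.length) 0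
  (List.range m).map (fun j => rows.map (fun r => r.getD j none))

-- one iteration of A's `for i in indexes` loop (the `none` branch of full_header[i] is an
-- IndexError in Python; those inputs are excluded by Pre_)
def pvStepA (nrows : Nat) (full_header : List String)
    (st : List (List (Option String)) × List String) (i : Int) :
    List (List (Option String)) × List String :=
  match PySem.List.pyGet? full_header i with
  | none => st
  | some name =>
    if name = "dss_record_source" ∨ name = "dss_load_date" then st
    else
      (PySem.List.slice st.1 none (some i)
         ++ List.replicate nrows (none : Option String) :: PySem.List.slice st.1 (some i) none,
       PySem.List.slice st.2 none (some i) ++ name :: PySem.List.slice st.2 (some i) none)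

def add_empty_columns (content : List (List (Option String))) (header : List String) (indexes : List Int) (full_header : List String) : List (List (Option String)) × List String :=
  let transposed := pvZipLongest content
  let st := indexes.foldl (pvStepA content.length full_header) (transposed, header)
  (pvZipLongest st.1, st.2)

-- ===== PORT B =====
-- one iteration of B's loop: row-wise list.insert (same IndexError caveat as in A)
def pvStepB (full_header : List String)
    (st : List (List (Option String)) × List String) (i : Int) :
    List (List (Option String)) × List String :=
  match PySem.List.pyGet? full_header i with
  | none => st
  | some name =>
    if name = "dss_record_source" ∨ name = "dss_load_date" then st
    else
      (st.1.map (fun r => PySem.List.insert r i (none : Option String)),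
       PySem.List.insert st.2 i name)

def add_empty_columns_alt (content : List (List (Option String))) (header : List String) (indexes : List Int) (full_header : List String) : List (List (Option String)) × List String :=
  let width := content.foldl (fun acc r => max acc r.length) 0
  let rows := content.map (fun r => r ++ List.replicate (width - r.length) (none : Option String))
  let st := indexes.foldl (pvStepB full_header) (rows, header)
  (st.1, st.2)

-- ===== PRECONDITION & SPEC =====
-- Pre_ excludes exactly the inputs with an index out of range of full_header, on which A
-- (and B alike) raises IndexError at full_header[i].
def Pre_add_empty_columns (content : List (List (Option String))) (header : List String) (indexes : List Int) (full_header : List String) : Prop :=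
  ∀ i ∈ indexes, -(full_header.length : Int) ≤ i ∧ i < full_header.length
instance (content : List (List (Option String))) (header : List String) (indexes : List Int) (full_header : List String) : Decidable (Pre_add_empty_columns content header indexes full_header) := by unfold Pre_add_empty_columns; infer_instance

def pvWitness_add_empty_columns : List (List (Option String)) × List String × List Int × List String :=
  ([[some "a", none], [some "b"]], ["h1", "h2"], [1, 0], ["x", "h1", "h2"])

-- On nonempty content whose rows are ALL empty and whose indexes all hit the skipped dss_
-- names, A's transpose collapses the table and it returns [] for the content, silently
-- dropping the rows; B keeps one (empty, padded) row per input row, which is the intended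
-- shape (row count preserved).
def D_add_empty_columns (content : List (List (Option String))) (header : List String) (indexes : List Int) (full_header : List String) : Prop :=
  content ≠ [] ∧ (∀ r ∈ content, r = []) ∧
    (∀ i ∈ indexes, PySem.List.pyGet? full_header i = some "dss_record_source" ∨
      PySem.List.pyGet? full_header i = some "dss_load_date")
instance (content : List (List (Option String))) (header : List String) (indexes : List Int) (full_header : List String) : Decidable (D_add_empty_columns content header indexes full_header) := by unfold D_add_empty_columns; infer_instance

def Spec_add_empty_columns (content : List (List (Option String))) (header : List String) (indexes : List Int) (full_header : List String) (out : List (List (Option String)) × List String) : Prop := ¬ D_add_empty_columns content header indexes full_header → out = add_empty_columns_alt content header indexes full_header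
instance (content : List (List (Option String))) (header : List String) (indexes : List Int) (full_header : List String) (out : List (List (Option String)) × List String) : Decidable (Spec_add_empty_columns content header indexes full_header out) := by unfold Spec_add_empty_columns; infer_instance

def pvDiffWitness_add_empty_columns : List (List (Option String)) × List String × List Int × List String :=
  ([[]], ["h"], [], ["h"])
def pvDiffWitnessOut_add_empty_columns : (List (List (Option String)) × List String) × (List (List (Option String)) × List String) :=
  (([], ["h"]), ([[]], ["h"]))

-- ===== CLAIM (what is proved, stated in full; the proofs are below) =====
def Claim_unchanged_add_empty_columns : Prop := ∀ (content : List (List (Option String))) (header : List String) (indexes : List Int) (full_header : List String), Dom_add_empty_columns content header indexes full_header → Pre_add_empty_columns content header indexes full_header → Spec_add_empty_columns content header indexes full_header (add_empty_columns content header indexes full_header)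
def Claim_changed_add_empty_columns : Prop := Dom_add_empty_columns (pvDiffWitness_add_empty_columns.1) (pvDiffWitness_add_empty_columns.2.1) (pvDiffWitness_add_empty_columns.2.2.1) (pvDiffWitness_add_empty_columns.2.2.2) ∧ Pre_add_empty_columns (pvDiffWitness_add_empty_columns.1) (pvDiffWitness_add_empty_columns.2.1) (pvDiffWitness_add_empty_columns.2.2.1) (pvDiffWitness_add_empty_columns.2.2.2) ∧ D_add_empty_columns (pvDiffWitness_add_empty_columns.1) (pvDiffWitness_add_empty_columns.2.1) (pvDiffWitness_add_empty_columns.2.2.1) (pvDiffWitness_add_empty_columns.2.2.2) ∧ add_empty_columns (pvDiffWitness_add_empty_columns.1) (pvDiffWitness_add_empty_columns.2.1) (pvDiffWitness_add_empty_columns.2.2.1) (pvDiffWitness_add_empty_columns.2.2.2) = pvDiffWitnessOut_add_empty_columns.1 ∧ add_empty_columns_alt (pvDiffWitness_add_empty_columns.1) (pvDiffWitness_add_empty_columns.2.1) (pvDiffWitness_add_empty_columns.2.2.1) (pvDiffWitness_add_empty_columns.2.2.2) = pvDiffWitnessOut_add_empty_columns.2 ∧ pvDiffWitnessOut_add_empty_columns.1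 ≠ pvDiffWitnessOut_add_empty_columns.2
def Claim_exact_add_empty_columns : Prop := ∀ (content : List (List (Option String))) (header : List String) (indexes : List Int) (full_header : List String), Dom_add_empty_columns content header indexes full_header → Pre_add_empty_columns content header indexes full_header → D_add_empty_columns content header indexes full_header → add_empty_columns content header indexes full_header ≠ add_empty_columns_alt content header indexes full_header

-- ===== LEMMAS AND PROOFS =====

-- the k-indexed retranspose: row k of `pvTr n t` collects entry k of every column of t
def pvTr (n : Nat) (t : List (List (Option String))) : List (List (Option String)) :=
  (List.range n).map (fun k => t.map (fun c => c.getD k none))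

theorem pv_clamp_aux (n : Nat) (j : Int) :
    (if j < 0 then max (j + (n:Int)) 0 else min j (n:Int)).toNat = PySem.List.clampIdx n j := by
  simp [PySem.List.clampIdx]; split_ifs <;> omega

theorem pv_insert_take_drop {α : Type} (xs : List α) (i : Int) (v : α) :
    PySem.List.insert xs i v
      = xs.take (PySem.List.clampIdx xs.length i) ++ v :: xs.drop (PySem.List.clampIdx xs.length i) := by
  simp only [PySem.List.insert, PySem.List.sliceIndices]
  norm_num [pv_clamp_aux]

theorem pv_splice_take_drop {α : Type} (xs : List α) (i : Int) (v : α) :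
    PySem.List.slice xs none (some i) ++ v :: PySem.List.slice xs (some i) none
      = xs.take (PySem.List.clampIdx xs.length i) ++ v :: xs.drop (PySem.List.clampIdx xs.length i) := by
  simp only [PySem.List.slice]
  norm_num

theorem pv_foldl_max_le (l : List (List (Option String))) :
    ∀ (a : Nat), (∀ r ∈ l, r.length ≤ l.foldl (fun acc r => max acc r.length) a)
      ∧ a ≤ l.foldl (fun acc r => max acc r.length) a := by
  induction l with
  | nil => simp
  | cons x xs ih =>
    intro a
    simp only [List.foldl_cons]
    refine ⟨?_, le_trans (le_max_left a x.length) (ih (max a x.length)).2⟩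
    intro r hr
    rcases List.mem_cons.mp hr with hr | hr
    · subst hr; exact le_trans (le_max_right _ _) (ih _).2
    · exact (ih (max a x.length)).1 r hr

theorem pv_range_map_getD (r : List (Option String)) (m : Nat) (h : r.length ≤ m) :
    (List.range m).map (fun j => r.getD j none) = r ++ List.replicate (m - r.length) none := by
  apply List.ext_getElem
  · simp; omega
  · intro j hj hj'
    simp only [List.getElem_map, List.getElem_range]
    by_cases hjr : j < r.length
    · rw [List.getElem_append_left hjr, List.getD_eq_getElem r none hjr]
    · rw [List.getElem_append_right (by omega)]
      simp [List.getD, List.getElem?_eq_none (by omega : r.length ≤ j)]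

theorem pv_tr_init (content : List (List (Option String))) :
    pvTr content.length (pvZipLongest content)
      = content.map (fun r => r ++ List.replicate
          ((content.foldl (fun acc r => max acc r.length) 0) - r.length) (none : Option String)) := by
  unfold pvTr pvZipLongest
  apply List.ext_getElem
  · simp
  · intro k hk hk'
    simp only [List.getElem_map, List.getElem_range, List.map_map]
    have hk2 : k < content.length := by simpa using hk'
    have hcongr : ∀ j ∈ List.range (content.foldl (fun acc r => max acc r.length) 0),
        ((fun c => c.getD k none) ∘ (fun j => content.map (fun r => r.getD j none))) j
          = content[k].getD j none := by
      intro j _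
      simp only [Function.comp_apply, List.getD, List.getElem?_map,
        List.getElem?_eq_getElem hk2, Option.map_some]
      rfl
    rw [List.map_congr_left hcongr,
      pv_range_map_getD content[k] _ ((pv_foldl_max_le content 0).1 content[k] (content.getElem_mem hk2))]

theorem pv_step_equiv (fh : List String) (n : Nat) (t : List (List (Option String)))
    (h : List String) (i : Int) :
    pvStepB fh (pvTr n t, h) i
      = (pvTr n (pvStepA n fh (t, h) i).1, (pvStepA n fh (t, h) i).2) := by
  unfold pvStepA pvStepB
  cases hg : PySem.List.pyGet? fh i with
  | none => rfl
  | some name =>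
    simp only []
    split_ifs with hskip
    · rfl
    · refine Prod.ext ?_ ?_
      · show (pvTr n t).map (fun r => PySem.List.insert r i none)
            = pvTr n (PySem.List.slice t none (some i)
                ++ List.replicate n (none : Option String) :: PySem.List.slice t (some i) none)
        rw [pv_splice_take_drop]
        unfold pvTr
        rw [List.map_map]
        apply List.map_congr_left
        intro k _
        simp only [Function.comp_apply]
        rw [pv_insert_take_drop]
        simp [List.map_take, List.map_drop, List.getD]
      · show PySem.List.insert h i name
            = PySem.List.slice h none (some i) ++ name :: PySem.List.slice h (some i) none
        rw [pv_splice_take_drop, pv_insert_take_drop]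

theorem pv_stepA_nil (fh : List String) (n : Nat)
    (st : List (List (Option String)) × List String) (i : Int)
    (hne : (pvStepA n fh st i).1 = []) :
    st.1 = [] ∧ ∀ st', pvStepA n fh st' i = st' := by
  unfold pvStepA at hne ⊢
  cases hg : PySem.List.pyGet? fh i with
  | none => rw [hg] at hne; exact ⟨hne, fun st' => rfl⟩
  | some name =>
    rw [hg] at hne
    by_cases hskip : name = "dss_record_source" ∨ name = "dss_load_date"
    · simp only [hskip, if_true] at hne
      exact ⟨hne, fun st' => by simp [hskip]⟩
    · exfalso
      simp only [hskip, if_false, pv_splice_take_drop] at hne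
      exact List.append_ne_nil_of_right_ne_nil _ (by simp) hne

theorem pv_stepA_len (fh : List String) (n : Nat)
    (st : List (List (Option String)) × List String) (i : Int)
    (hc : ∀ c ∈ st.1, c.length = n) : ∀ c ∈ (pvStepA n fh st i).1, c.length = n := by
  unfold pvStepA
  cases hg : PySem.List.pyGet? fh i with
  | none => exact hc
  | some name =>
    simp only []
    split_ifs with hskip
    · exact hc
    · intro c hc'
      simp only [pv_splice_take_drop] at hc'
      rcases List.mem_append.mp hc' with hm | hm
      · exact hc c (List.mem_of_mem_take hm)
      · rcases List.mem_cons.mp hm with hm | hm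
        · simp [hm]
        · exact hc c (List.mem_of_mem_drop hm)

theorem pv_fold_inv (fh : List String) (n : Nat) :
    ∀ (idxs : List Int) (t : List (List (Option String))) (h : List String),
      idxs.foldl (pvStepB fh) (pvTr n t, h)
          = (pvTr n (idxs.foldl (pvStepA n fh) (t, h)).1, (idxs.foldl (pvStepA n fh) (t, h)).2)
        ∧ ((∀ c ∈ t, c.length = n) → ∀ c ∈ (idxs.foldl (pvStepA n fh) (t, h)).1, c.length = n)
        ∧ ((idxs.foldl (pvStepA n fh) (t, h)).1 = [] →
            t = [] ∧ ∀ i ∈ idxs, ∀ st, pvStepA n fh st i = st) := by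
  intro idxs
  induction idxs with
  | nil => exact fun t h => ⟨rfl, fun hc => hc, fun _ => ⟨by assumption, by simp⟩⟩
  | cons i idxs ih =>
    intro t h
    simp only [List.foldl_cons, pv_step_equiv]
    obtain ⟨e1, e2, e3⟩ := ih (pvStepA n fh (t, h) i).1 (pvStepA n fh (t, h) i).2
    refine ⟨?_, ?_, ?_⟩
    · simpa using e1
    · intro hc
      have := e2 (pv_stepA_len fh n (t, h) i hc)
      simpa using this
    · intro hnil
      have hnil' : (idxs.foldl (pvStepA n fh)
          ((pvStepA n fh (t, h) i).1, (pvStepA n fh (t, h) i).2)).1 = [] := by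
        simpa using hnil
      obtain ⟨hs1, hrest⟩ := e3 hnil'
      obtain ⟨ht, hstep⟩ := pv_stepA_nil fh n (t, h) i hs1
      refine ⟨ht, ?_⟩
      intro i' hi' st
      rcases List.mem_cons.mp hi' with hi' | hi'
      · exact hi' ▸ hstep st
      · exact hrest i' hi' st

theorem pv_foldl_max_const (n : Nat) : ∀ (l : List (List (Option String))) (a : Nat),
    (∀ c ∈ l, c.length = n) → a ≤ n → l ≠ [] →
    l.foldl (fun acc r => max acc r.length) a = n := by
  intro l
  induction l with
  | nil => intro a _ _ hne; exact absurd rfl hne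
  | cons c cs ih =>
    intro a hc ha _
    simp only [List.foldl_cons]
    rcases eq_or_ne cs [] with h | h
    · subst h
      have := hc c List.mem_cons_self
      simp only [List.foldl_nil]
      omega
    · exact ih (max a c.length) (fun x hx => hc x (List.mem_cons_of_mem c hx))
        (by have := hc c List.mem_cons_self; omega) h

theorem pv_final_zip (n : Nat) (t : List (List (Option String)))
    (hc : ∀ c ∈ t, c.length = n) (hne : t = [] → n = 0) :
    pvZipLongest t = pvTr n t := by
  unfold pvZipLongest pvTr
  rcases eq_or_ne t [] with h | h
  · subst h; simp [hne rfl]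
  · rw [pv_foldl_max_const n t 0 hc (Nat.zero_le n) h]

theorem pv_inrange_some (fh : List String) (i : Int)
    (hr : -(fh.length : Int) ≤ i ∧ i < fh.length) :
    ∃ name, PySem.List.pyGet? fh i = some name := by
  cases hgg : PySem.List.pyGet? fh i with
  | none =>
    rw [PySem.List.pyGet?_eq_none_iff] at hgg
    exact absurd (by simp [PySem.Raise.InRange]; omega) hgg
  | some name => exact ⟨name, rfl⟩

theorem pv_skip_of_fix (fh : List String) (n : Nat) (i : Int)
    (hfix : ∀ st, pvStepA n fh st i = st)
    (hr : -(fh.length : Int) ≤ i ∧ i < fh.length) :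
    PySem.List.pyGet? fh i = some "dss_record_source" ∨
      PySem.List.pyGet? fh i = some "dss_load_date" := by
  obtain ⟨name, hgname⟩ := pv_inrange_some fh i hr
  by_cases hskip : name = "dss_record_source" ∨ name = "dss_load_date"
  · rcases hskip with h | h
    · exact Or.inl (h ▸ hgname)
    · exact Or.inr (h ▸ hgname)
  · exfalso
    have hfx := hfix ([], [])
    unfold pvStepA at hfx
    rw [hgname] at hfx
    simp only [hskip, if_false] at hfx
    have := congrArg Prod.fst hfx
    simp [PySem.List.slice] at this

theorem pv_stepA_skip (fh : List String) (n : Nat) (i : Int)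
    (hsk : PySem.List.pyGet? fh i = some "dss_record_source" ∨
      PySem.List.pyGet? fh i = some "dss_load_date") :
    ∀ st, pvStepA n fh st i = st := by
  intro st
  unfold pvStepA
  rcases hsk with h | h <;> rw [h] <;> simp

theorem pv_stepB_skip (fh : List String) (i : Int)
    (hsk : PySem.List.pyGet? fh i = some "dss_record_source" ∨
      PySem.List.pyGet? fh i = some "dss_load_date") :
    ∀ st, pvStepB fh st i = st := by
  intro st
  unfold pvStepB
  rcases hsk with h | h <;> rw [h] <;> simp

theorem pv_foldl_fix {σ : Type} (step : σ → Int → σ) :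
    ∀ (idxs : List Int) (st : σ), (∀ i ∈ idxs, ∀ st', step st' i = st') →
      idxs.foldl step st = st := by
  intro idxs
  induction idxs with
  | nil => intro st _; rfl
  | cons i is ih =>
    intro st hsk
    simp only [List.foldl_cons, hsk i List.mem_cons_self st]
    exact ih st (fun j hj => hsk j (List.mem_cons_of_mem i hj))

theorem add_empty_columns_spec : Claim_unchanged_add_empty_columns := by
  intro content header indexes full_header _ hpre hnD
  unfold add_empty_columns add_empty_columns_alt
  simp only []
  have hc0 : ∀ c ∈ pvZipLongest content, c.length = content.length := by
    intro c hc
    unfold pvZipLongest at hc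
    simp only [List.mem_map] at hc
    obtain ⟨j, _, rfl⟩ := hc
    simp
  obtain ⟨e1, e2, e3⟩ :=
    pv_fold_inv full_header content.length indexes (pvZipLongest content) header
  have hlen := e2 hc0
  have hn0 : (indexes.foldl (pvStepA content.length full_header)
      (pvZipLongest content, header)).1 = [] → content.length = 0 := by
    intro hnil
    obtain ⟨ht0, hsk⟩ := e3 hnil
    by_contra hn
    apply hnD
    refine ⟨fun hcnil => hn (by simp [hcnil]), ?_, ?_⟩
    · intro r hr
      have hle := (pv_foldl_max_le content 0).1 r hr
      have hm0 : content.foldl (fun acc r => max acc r.length) 0 = 0 := by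
        unfold pvZipLongest at ht0
        simpa using ht0
      rw [hm0] at hle
      exact List.eq_nil_of_length_eq_zero (Nat.le_zero.mp hle)
    · intro i hi
      exact pv_skip_of_fix full_header content.length i (hsk i hi) (hpre i hi)
  rw [← pv_tr_init content, e1,
    pv_final_zip content.length _ hlen hn0]

theorem add_empty_columns_changed : Claim_changed_add_empty_columns := by
  unfold Claim_changed_add_empty_columns; decide

theorem add_empty_columns_tight : Claim_exact_add_empty_columns := by
  intro content header indexes full_header _ _ hD heq
  obtain ⟨hcne, hrows, hsk⟩ := hD
  have hskA : ∀ i ∈ indexes, ∀ st, pvStepA content.length full_header st i = st :=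
    fun i hi => pv_stepA_skip full_header content.length i (hsk i hi)
  have hskB : ∀ i ∈ indexes, ∀ st, pvStepB full_header st i = st :=
    fun i hi => pv_stepB_skip full_header i (hsk i hi)
  have hm0 : content.foldl (fun acc r => max acc r.length) 0 = 0 :=
    pv_foldl_max_const 0 content 0
      (fun c hc => by rw [hrows c hc]; rfl) (le_refl 0) hcne
  have hA : (add_empty_columns content header indexes full_header).1 = [] := by
    unfold add_empty_columns
    simp only []
    rw [pv_foldl_fix _ indexes _ hskA]
    unfold pvZipLongest
    simp [hm0]
  have hB : (add_empty_columns_alt content header indexes full_header).1.length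
      = content.length := by
    unfold add_empty_columns_alt
    simp only []
    rw [pv_foldl_fix _ indexes _ hskB]
    simp
  rw [heq] at hA
  rw [hA] at hB
  simp at hB
  exact hcne (List.eq_nil_of_length_eq_zero hB.symm)
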